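-- pv_equiv track=rewrite | github.com/vishalsiingh/CodeSprint | Day21/q2.py | magician_deck
-- ===== SOURCE A (Python) =====
-- from collections import deque
--
-- def magician_deck(deck):
--   deck.sort()
--   res=deque()
--   for card in reversed(deck):
--     if res:
--       res.appendleft(res.pop())
--     res.appendleft(card)
--   return list(res)
-- ===== SOURCE B (Python) =====
-- from collections import deque
--
-- def magician_deck(deck):
--   deck.sort()
--   n = len(deck)
--   res = [None] * n
--   q = deque(range(n))
--   for card in deck:
--     idx = q.popleft()
--     res[idx] = card
--     if q:
--       q.append(q.popleft())
--   return res
-- ===== Notes on version B (the rewrite author's own statement) =====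
-- stated objective: alternative
-- what changed: A builds the deck backwards over the reversed sorted list by rotating a deque of cards; B instead simulates the reveal process forwards, keeping a queue of positions and writing each sorted card into the position revealed next.
import Mathlib
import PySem

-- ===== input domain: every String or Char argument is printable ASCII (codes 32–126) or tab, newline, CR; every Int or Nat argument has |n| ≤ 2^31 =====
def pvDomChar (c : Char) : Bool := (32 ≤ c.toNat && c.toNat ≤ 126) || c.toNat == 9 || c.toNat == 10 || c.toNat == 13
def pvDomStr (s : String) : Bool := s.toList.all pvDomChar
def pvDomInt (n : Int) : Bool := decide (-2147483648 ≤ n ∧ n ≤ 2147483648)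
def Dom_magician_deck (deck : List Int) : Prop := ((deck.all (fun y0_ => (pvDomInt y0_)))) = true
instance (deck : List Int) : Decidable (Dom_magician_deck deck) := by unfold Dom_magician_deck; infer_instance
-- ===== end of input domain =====

-- B rearranges the sorted cards by forward-simulating the reveal process with a queue of
-- positions, instead of A's backward construction of the deck by rotating a deque of cards.
-- Both Pythons sort the argument in place; the theorems below are about the return value.

-- ===== PORT A =====
-- the deque 'res' is modelled front-at-head: appendleft = cons, pop = remove the last element
def aStep (res : List Int) (card : Int) : List Int :=
  match res.getLast? with
  | none => card :: res                         -- res was empty: just appendleft(card)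
  | some x => card :: x :: res.dropLast         -- res.appendleft(res.pop()); res.appendleft(card)

def magician_deck (deck : List Int) : List Int :=
  (PySem.List.sorted deck (fun x => x) false).reverse.foldl aStep []

-- ===== PORT B =====
-- res is initialised with 0 placeholders (Python uses None); every slot is written exactly once.
-- The 'q = []' branch is a totality guard only: |q| = |remaining cards| throughout, so it never fires.
def bLoop : List Int → List Nat → List Int → List Int
  | [], _, res => res
  | card :: cs, q, res =>
    match q with
    | [] => res
    | idx :: q' =>
      let res' := res.set idx card
      let q'' := match q' with
        | [] => q'
        | y :: t => t ++ [y]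
      bLoop cs q'' res'

def magician_deck_alt (deck : List Int) : List Int :=
  let s := PySem.List.sorted deck (fun x => x) false
  bLoop s (List.range s.length) (List.replicate s.length 0)

-- ===== PRECONDITION & SPEC =====
def Spec_magician_deck (deck : List Int) (out : List Int) : Prop := out = magician_deck_alt deck
instance (deck : List Int) (out : List Int) : Decidable (Spec_magician_deck deck out) := by unfold Spec_magician_deck; infer_instance

-- ===== CLAIM (what is proved, stated in full; the proofs are below) =====
def Claim_equal_magician_deck : Prop := ∀ (deck : List Int), Dom_magician_deck deck → Spec_magician_deck deck (magician_deck deck)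

-- ===== LEMMAS AND PROOFS =====

/-- Move the head of a list to its end (one step of the reveal rotation). -/
def rotL {α : Type} : List α → List α
  | [] => []
  | x :: xs => xs ++ [x]

theorem rotL_length {α : Type} (l : List α) : (rotL l).length = l.length := by
  cases l <;> simp [rotL]

/-- The sequence in which the magician reveals the elements of `l`. -/
def reveal {α : Type} : List α → List α
  | [] => []
  | x :: xs => x :: reveal (rotL xs)
termination_by l => l.length
decreasing_by simp [rotL_length]

/-- A's loop, written as structural recursion on the (unsorted-direction) list. -/
def recA : List Int → List Int
  | [] => []
  | c :: t => aStep (recA t) c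

theorem magician_deck_eq_recA (deck : List Int) :
    magician_deck deck = recA (PySem.List.sorted deck (fun x => x) false) := by
  unfold magician_deck
  rw [List.foldl_reverse]
  induction PySem.List.sorted deck (fun x => x) false with
  | nil => rfl
  | cons c t ih => simp [recA, ih]

theorem aStep_reveal (acc : List Int) (c : Int) :
    reveal (aStep acc c) = c :: reveal acc := by
  rcases List.eq_nil_or_concat acc with h | ⟨l, a, h⟩ <;> subst h
  · simp [aStep, reveal, rotL]
  · simp [aStep, reveal, rotL]

theorem reveal_recA (l : List Int) : reveal (recA l) = l := by
  induction l with
  | nil => simp [recA, reveal]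
  | cons c t ih => simp [recA, aStep_reveal, ih]

theorem aStep_length (acc : List Int) (c : Int) :
    (aStep acc c).length = acc.length + 1 := by
  rcases List.eq_nil_or_concat acc with h | ⟨l, a, h⟩ <;> subst h <;> simp [aStep]

theorem recA_length (l : List Int) : (recA l).length = l.length := by
  induction l with
  | nil => rfl
  | cons c t ih => simp [recA, aStep_length, ih]

theorem reveal_perm {α : Type} (l : List α) : (reveal l).Perm l := by
  induction l using reveal.induct with
  | case1 => simp [reveal]
  | case2 x xs ih =>
    rw [reveal]
    exact ((ih.cons x).trans (by cases xs <;> simp [rotL, List.perm_append_singleton]))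

theorem reveal_map {α β : Type} (f : α → β) (l : List α) :
    reveal (l.map f) = (reveal l).map f := by
  induction l using reveal.induct with
  | case1 => simp [reveal]
  | case2 x xs ih =>
    cases xs with
    | nil => simp [reveal, rotL]
    | cons y t => simpa [reveal, rotL] using ih

theorem zip_self_map {α β : Type} (g : α → β) (l : List α) :
    l.zip (l.map g) = l.map (fun i => (i, g i)) := by
  induction l with
  | nil => rfl
  | cons x t ih => simp [ih]

/-- B's loop is: write the sorted cards, in order, at the positions `reveal q`. -/
theorem bLoop_eq (cards : List Int) :
    ∀ (q : List Nat) (res : List Int), q.length = cards.length →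
      bLoop cards q res = ((reveal q).zip cards).foldl (fun r p => r.set p.1 p.2) res := by
  induction cards with
  | nil => intro q res _; cases q <;> simp [bLoop]
  | cons c cs ih =>
    intro q res hlen
    cases q with
    | nil => simp at hlen
    | cons i q' =>
      simp only [List.length_cons, Nat.add_right_cancel_iff] at hlen
      rw [show reveal (i :: q') = i :: reveal (rotL q') from by rw [reveal]]
      cases q' with
      | nil =>
        have h0 : cs = [] := by simpa using hlen.symm
        subst h0
        simp [bLoop, reveal, rotL]
      | cons y t =>
        show bLoop cs (t ++ [y]) (res.set i c) = _
        rw [ih (t ++ [y]) (res.set i c) (by simpa using hlen)]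
        simp [rotL]

theorem setFold_getElem? (g : Nat → Int) (j : Nat) :
    ∀ (idxs : List Nat) (base : List Int),
      ((idxs.foldl (fun r i => r.set i (g i)) base)[j]?) =
        if j ∈ idxs ∧ j < base.length then some (g j) else base[j]? := by
  intro idxs
  induction idxs with
  | nil => intro base; simp
  | cons i t ih =>
    intro base
    rw [List.foldl_cons, ih]
    by_cases hjl : j < base.length
    · by_cases hjt : j ∈ t
      · simp [hjt, hjl]
      · rcases eq_or_ne j i with rfl | hne
        · simp [hjt, hjl]
        · simp [hjt, hjl, hne, Ne.symm hne]
    · have h1 : (base.set i (g i))[j]? = none := by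
        simp [le_of_not_gt hjl]
      have h2 : base[j]? = none := by
        simp [le_of_not_gt hjl]
      simp [hjl]

theorem map_getD_range (r : List Int) :
    (List.range r.length).map (fun i => r[i]?.getD 0) = r := by
  apply List.ext_getElem
  · simp
  · intro i h1 h2
    simp [List.getElem?_eq_getElem h2]

theorem magician_deck_spec' (deck : List Int) :
    magician_deck deck = magician_deck_alt deck := by
  set s := PySem.List.sorted deck (fun x => x) false with hs
  set n := s.length with hn
  set r := recA s with hr
  have hrlen : r.length = n := recA_length s
  have hrev : reveal r = s := reveal_recA s
  set g : Nat → Int := fun i => r[i]?.getD 0 with hg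
  have hrmap : (List.range n).map g = r := by rw [← hrlen]; exact map_getD_range r
  -- B's result:
  have hB : magician_deck_alt deck =
      ((reveal (List.range n)).map (fun i => (i, g i))).foldl (fun r p => r.set p.1 p.2)
        (List.replicate n 0) := by
    show bLoop s (List.range s.length) (List.replicate s.length 0) = _
    rw [bLoop_eq s (List.range s.length) _ (by simp)]
    rw [← hn]
    have : s = (reveal (List.range n)).map g := by
      rw [← reveal_map, hrmap, hrev]
    rw [this, zip_self_map]
  rw [magician_deck_eq_recA, ← hs, ← hr, hB, List.foldl_map]
  -- compare elementwise
  have hperm : (reveal (List.range n)).Perm (List.range n) := reveal_perm _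
  apply List.ext_getElem?
  intro j
  rw [setFold_getElem? g j]
  by_cases hj : j < n
  · have hmem : j ∈ reveal (List.range n) := hperm.mem_iff.mpr (by simpa using hj)
    simp only [hmem, List.length_replicate, hj, and_self, if_true]
    rw [hg]
    have : r[j]? = some r[j] := List.getElem?_eq_getElem (by omega)
    simp [this]
  · have hmemr : j ∉ reveal (List.range n) := fun h => hj (by simpa using hperm.mem_iff.mp h)
    simp [hmemr, hrlen, le_of_not_gt hj]

-- ===== VERDICT (by name: the statement is the Claim_ definition above) =====
theorem magician_deck_spec : Claim_equal_magician_deck := by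
  intro deck _
  exact magician_deck_spec' deck
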